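-- pv_equiv track=rewrite | github.com/HBinhCT/Q-project | hackerrank/Algorithms/Wet Shark and Two Subsequences/solution.py | twoSubsequences
-- ===== SOURCE A (Python) =====
-- def twoSubsequences(x, r, s):
--     #
--     # Write your code here.
--     #
--     if r < s or (r + s) % 2 or (r == 0 and s == 0):
--         return 0
--     mod = 1000000007  # 10 ** 9 + 7
--     ln = len(x)
--     dp = [[0] * (ln + 1) for _ in range(r + 1)]
--     dp[0][0] = 1
--     sum_a = (r + s) // 2
--     sum_b = (r - s) // 2
--     if x[0] <= sum_a:
--         dp[x[0]][1] = 1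
--     for i in range(1, ln):
--         for j in range(sum_a, 0, -1):
--             for k in range(1, ln + 1):
--                 if j >= x[i]:
--                     dp[j][k] += dp[j - x[i]][k - 1]
--                     dp[j][k] %= mod
--     ans = 0
--     for i in range(1, ln + 1):
--         ans += dp[sum_a][i] * dp[sum_b][i]
--         ans %= mod
--     return ans
-- ===== SOURCE B (Python) =====
-- from functools import lru_cache
--
--
-- def twoSubsequences(x, r, s):
--     # Memoized top-down recursion counting subsequences by (suffix, sum, length),
--     # correlated once at the end -- replaces A's in-place 2D-array knapsack.
--     if r < s or (r + s) % 2 or (r == 0 and s == 0):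
--         return 0
--     mod = 1000000007
--     sum_a = (r + s) // 2
--     sum_b = (r - s) // 2
--     xs = tuple(x)
--     ln = len(xs)
--
--     @lru_cache(maxsize=None)
--     def cnt(i, j, k):
--         # number of subsequences of xs[i:] with sum j and length k, mod 1e9+7
--         if j < 0 or k < 0:
--             return 0
--         if i == ln:
--             return 1 if j == 0 and k == 0 else 0
--         return (cnt(i + 1, j, k) + cnt(i + 1, j - xs[i], k - 1)) % mod
--
--     return sum(cnt(0, sum_a, i) * cnt(0, sum_b, i) for i in range(1, ln + 1)) % mod
-- ===== Notes on version B (the rewrite author's own statement) =====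
-- stated objective: alternative
-- what changed: Replaces A's in-place 2D knapsack array (special-cased first element, reversed-index triple loop over the whole table) with a memoized top-down recursion counting subsequences of each suffix by (sum, length), correlated once in the final sum.
-- outside the precondition, e.g. on twoSubsequences([0, 0, 2], 2, 2): A returns 1, B returns 4; on twoSubsequences([1, 3], 4, -2): A returns 0, B returns 1; on twoSubsequences([-1, 1, 3], 2, 2): A returns 0, B returns 1
import Mathlib
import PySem

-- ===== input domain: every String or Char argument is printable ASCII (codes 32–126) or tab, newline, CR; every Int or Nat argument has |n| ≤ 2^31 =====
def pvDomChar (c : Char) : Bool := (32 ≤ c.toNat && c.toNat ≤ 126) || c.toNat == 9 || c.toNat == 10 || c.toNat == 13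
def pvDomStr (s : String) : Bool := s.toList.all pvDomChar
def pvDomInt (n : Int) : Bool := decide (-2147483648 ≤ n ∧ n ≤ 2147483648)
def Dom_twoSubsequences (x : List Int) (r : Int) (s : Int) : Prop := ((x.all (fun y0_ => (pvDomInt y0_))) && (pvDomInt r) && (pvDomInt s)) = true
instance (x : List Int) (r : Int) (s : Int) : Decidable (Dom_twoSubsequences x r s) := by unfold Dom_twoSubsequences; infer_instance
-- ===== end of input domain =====

-- B replaces A's in-place 2D-array knapsack (special-cased first element, reversed-index
-- triple loop) by a memoized top-down recursion counting subsequences by sum and length,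
-- correlated in one final sum (objective: alternative, same asymptotic cost).

-- ===== PORT A =====
-- Python dp[j][k] reads/writes; Python raises IndexError out of range — Pre_ keeps all
-- indices in range, so the total forms below are exact on every admitted input.
def pvGet2 (dp : List (List Int)) (j k : Int) : Int :=
  PySem.List.pyGetD (PySem.List.pyGetD dp j []) k 0

def pvSet2 (dp : List (List Int)) (j k : Int) (v : Int) : List (List Int) :=
  PySem.List.pySetD dp j (PySem.List.pySetD (PySem.List.pyGetD dp j []) k v)

-- body of A's item loop (the j/k loops for one x[i]), kept as a helper
def pvItemStep (sumA ln : Int) (dp : List (List Int)) (v : Int) : List (List Int) :=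
  (PySem.List.pyRange sumA 0 (-1)).foldl (fun dp j =>
    (PySem.List.pyRange 1 (ln + 1) 1).foldl (fun dp k =>
      if v ≤ j then
        pvSet2 dp j k ((pvGet2 dp j k + pvGet2 dp (j - v) (k - 1)) % 1000000007)
      else dp) dp) dp

def twoSubsequences (x : List Int) (r : Int) (s : Int) : Int :=
  if r < s ∨ PySem.Int.mod (r + s) 2 ≠ 0 ∨ (r = 0 ∧ s = 0) then 0
  else
    let ln : Int := x.length
    let dp0 : List (List Int) := List.replicate (r + 1).toNat (List.replicate (ln + 1).toNat 0)
    let dp1 := pvSet2 dp0 0 0 1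
    let sumA := PySem.Int.floordiv (r + s) 2
    let sumB := PySem.Int.floordiv (r - s) 2
    let dp2 := if PySem.List.pyGetD x 0 0 ≤ sumA then pvSet2 dp1 (PySem.List.pyGetD x 0 0) 1 1 else dp1
    let dp3 := (PySem.List.pyRange 1 ln 1).foldl
      (fun dp i => pvItemStep sumA ln dp (PySem.List.pyGetD x i 0)) dp2
    (PySem.List.pyRange 1 (ln + 1) 1).foldl
      (fun ans i => (ans + pvGet2 dp3 sumA i * pvGet2 dp3 sumB i) % 1000000007) 0

-- ===== PORT B =====
-- cnt(i, j, k) of Source B on the suffix xs[i:], carried here as the suffix list itself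
def pvCnt (l : List Int) (j k : Int) : Int :=
  match l with
  | [] => if j < 0 ∨ k < 0 then 0 else if j = 0 ∧ k = 0 then 1 else 0
  | v :: rest =>
      if j < 0 ∨ k < 0 then 0
      else (pvCnt rest j k + pvCnt rest (j - v) (k - 1)) % 1000000007

def twoSubsequences_alt (x : List Int) (r : Int) (s : Int) : Int :=
  if r < s ∨ PySem.Int.mod (r + s) 2 ≠ 0 ∨ (r = 0 ∧ s = 0) then 0
  else
    let ln : Int := x.length
    let sumA := PySem.Int.floordiv (r + s) 2
    let sumB := PySem.Int.floordiv (r - s) 2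
    ((PySem.List.pyRange 1 (ln + 1) 1).foldl
      (fun acc i => acc + pvCnt x sumA i * pvCnt x sumB i) 0) % 1000000007

-- ===== PRECONDITION & SPEC =====
-- Unless the early guard already returns 0, Pre_ restricts to the problem's natural domain
-- (nonempty x, all elements ≥ 1, s ≥ 0): outside it A's sum_a-truncated, Python-wraparound-
-- indexed table raises IndexError or returns accidental values (zero elements are double-
-- counted by the in-place update order; negative elements or negative s read/write rows
-- by negative-index wraparound or beyond the truncated table).
def Pre_twoSubsequences (x : List Int) (r : Int) (s : Int) : Prop :=
  (r < s ∨ PySem.Int.mod (r + s) 2 ≠ 0 ∨ (r = 0 ∧ s = 0)) ∨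
    (x ≠ [] ∧ (∀ a ∈ x, 1 ≤ a) ∧ 0 ≤ s)
instance (x : List Int) (r : Int) (s : Int) : Decidable (Pre_twoSubsequences x r s) := by
  unfold Pre_twoSubsequences; infer_instance

def pvWitness_twoSubsequences : List Int × Int × Int := ([1, 2], 3, 1)

def Spec_twoSubsequences (x : List Int) (r : Int) (s : Int) (out : Int) : Prop :=
  out = twoSubsequences_alt x r s
instance (x : List Int) (r : Int) (s : Int) (out : Int) : Decidable (Spec_twoSubsequences x r s out) := by
  unfold Spec_twoSubsequences; infer_instance

-- ===== CLAIM (what is proved, stated in full; the proofs are below) =====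
def Claim_equal_twoSubsequences : Prop :=
  ∀ (x : List Int) (r : Int) (s : Int), Dom_twoSubsequences x r s →
    Pre_twoSubsequences x r s → Spec_twoSubsequences x r s (twoSubsequences x r s)

-- ===== LEMMAS AND PROOFS =====

-- exact (un-modded) number of subsequences with a given sum and length
def pvCC : List Int → Int → Int → Int
  | [], j, k => if j = 0 ∧ k = 0 then 1 else 0
  | v :: rest, j, k => pvCC rest j k + pvCC rest (j - v) (k - 1)

lemma pvCC_k_neg (l : List Int) (j k : Int) (hk : k < 0) : pvCC l j k = 0 := by
  induction l generalizing j k with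
  | nil => simp only [pvCC, if_neg (by omega : ¬ (j = 0 ∧ k = 0))]
  | cons v rest ih => simp only [pvCC, ih j k hk, ih (j - v) (k - 1) (by omega), add_zero]

lemma pvCC_j_neg (l : List Int) (j k : Int) (hl : ∀ a ∈ l, 1 ≤ a) (hj : j < 0) :
    pvCC l j k = 0 := by
  induction l generalizing j k with
  | nil => simp only [pvCC, if_neg (by omega : ¬ (j = 0 ∧ k = 0))]
  | cons v rest ih =>
    have hv : 1 ≤ v := hl v (by simp)
    have hrest : ∀ a ∈ rest, 1 ≤ a := fun a ha => hl a (by simp [ha])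
    simp only [pvCC, ih j k hrest hj, ih (j - v) (k - 1) hrest (by omega), add_zero]

lemma pvCnt_eq (l : List Int) (j k : Int) (hl : ∀ a ∈ l, 1 ≤ a) (hj : 0 ≤ j) (hk : 0 ≤ k) :
    pvCnt l j k = pvCC l j k % 1000000007 := by
  induction l generalizing j k with
  | nil =>
    simp only [pvCnt, pvCC, if_neg (by omega : ¬ (j < 0 ∨ k < 0))]
    split
    · decide
    · decide
  | cons v rest ih =>
    have hv : 1 ≤ v := hl v (by simp)
    have hrest : ∀ a ∈ rest, 1 ≤ a := fun a ha => hl a (by simp [ha])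
    simp only [pvCnt, pvCC, if_neg (by omega : ¬ (j < 0 ∨ k < 0))]
    by_cases hk1 : k - 1 < 0
    · have h2 : pvCnt rest (j - v) (k - 1) = 0 := by
        cases rest <;> · simp only [pvCnt]; rw [if_pos (Or.inr hk1)]
      rw [h2, pvCC_k_neg rest (j - v) (k - 1) hk1, ih j k hrest hj hk, add_zero, add_zero,
        Int.emod_emod_of_dvd _ dvd_rfl]
    · by_cases hjv : j - v < 0
      · have h2 : pvCnt rest (j - v) (k - 1) = 0 := by
          cases rest <;> · simp only [pvCnt]; rw [if_pos (Or.inl hjv)]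
        rw [h2, pvCC_j_neg rest (j - v) (k - 1) hrest hjv, ih j k hrest hj hk, add_zero,
          add_zero, Int.emod_emod_of_dvd _ dvd_rfl]
      · rw [ih j k hrest hj hk, ih (j - v) (k - 1) hrest (by omega) (by omega),
          ← Int.add_emod]

lemma pvCC_snoc (l : List Int) (v : Int) : ∀ (j k : Int),
    pvCC (l ++ [v]) j k = pvCC l j k + pvCC l (j - v) (k - 1) := by
  induction l with
  | nil => intro j k; rfl
  | cons w rest ih =>
    intro j k
    simp only [List.cons_append, pvCC, ih]
    have h : j - w - v = j - v - w := by ring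
    rw [h]; ring

def pvShape (dp : List (List Int)) (R C : Nat) : Prop :=
  dp.length = R ∧ ∀ row ∈ dp, row.length = C

lemma pvGet2_eq (dp : List (List Int)) (j k : Int) (hj : 0 ≤ j) (hk : 0 ≤ k) :
    pvGet2 dp j k = (dp.getD j.toNat []).getD k.toNat 0 := by
  unfold pvGet2
  obtain ⟨n, rfl⟩ : ∃ n : Nat, j = (n : Int) := ⟨j.toNat, by omega⟩
  obtain ⟨m, rfl⟩ : ∃ m : Nat, k = (m : Int) := ⟨k.toNat, by omega⟩
  rw [PySem.List.pyGetD_natCast, PySem.List.pyGetD_natCast]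
  simp

lemma pvSet2_eq (dp : List (List Int)) (j k v : Int) (hj : 0 ≤ j) (hk : 0 ≤ k) :
    pvSet2 dp j k v = dp.set j.toNat ((dp.getD j.toNat []).set k.toNat v) := by
  unfold pvSet2
  obtain ⟨n, rfl⟩ : ∃ n : Nat, j = (n : Int) := ⟨j.toNat, by omega⟩
  obtain ⟨m, rfl⟩ : ∃ m : Nat, k = (m : Int) := ⟨k.toNat, by omega⟩
  rw [PySem.List.pySetD_of_nonneg _ _ hk, PySem.List.pySetD_of_nonneg _ _ hj,
    PySem.List.pyGetD_natCast]
  simp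

lemma pvGetD_set_self {α : Type} (l : List α) (n : Nat) (a d : α) (h : n < l.length) :
    (l.set n a).getD n d = a := by
  rw [List.getD_eq_getElem?_getD, List.getElem?_set, if_pos rfl, if_pos h, Option.getD_some]

lemma pvGetD_set_ne {α : Type} (l : List α) (n m : Nat) (a d : α) (h : ¬ n = m) :
    (l.set n a).getD m d = l.getD m d := by
  rw [List.getD_eq_getElem?_getD, List.getElem?_set, if_neg h, ← List.getD_eq_getElem?_getD]

lemma pvGetDRow_mem (dp : List (List Int)) (n : Nat) (h : n < dp.length) :
    dp.getD n [] ∈ dp := by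
  rw [List.getD_eq_getElem?_getD, List.getElem?_eq_getElem h]
  exact List.getElem_mem h

lemma pvShape_set2 (dp : List (List Int)) (R C : Nat) (j k v : Int)
    (hj : 0 ≤ j) (hk : 0 ≤ k) (hS : pvShape dp R C) : pvShape (pvSet2 dp j k v) R C := by
  rw [pvSet2_eq _ _ _ _ hj hk]
  refine ⟨by simpa using hS.1, ?_⟩
  intro row hrow
  by_cases hr : j.toNat < dp.length
  · rcases List.mem_or_eq_of_mem_set hrow with h | h
    · exact hS.2 row h
    · subst h
      rw [List.length_set]
      exact hS.2 _ (pvGetDRow_mem dp j.toNat hr)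
  · rw [List.set_eq_of_length_le (by omega)] at hrow
    exact hS.2 row hrow

lemma pvGet2_pvSet2 (dp : List (List Int)) (R C : Nat) (hS : pvShape dp R C)
    (j k v j' k' : Int) (hj : 0 ≤ j) (hk : 0 ≤ k) (hjR : j.toNat < R) (hkC : k.toNat < C)
    (hj' : 0 ≤ j') (hk' : 0 ≤ k') :
    pvGet2 (pvSet2 dp j k v) j' k' = if j' = j ∧ k' = k then v else pvGet2 dp j' k' := by
  have hlen : dp.length = R := hS.1
  have hrowC : (dp.getD j.toNat []).length = C :=
    hS.2 _ (pvGetDRow_mem dp j.toNat (by omega))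
  rw [pvSet2_eq _ _ _ _ hj hk, pvGet2_eq _ _ _ hj' hk', pvGet2_eq _ _ _ hj' hk']
  by_cases h1 : j' = j
  · have h1n : j'.toNat = j.toNat := by omega
    rw [h1n, pvGetD_set_self _ _ _ _ (by omega)]
    by_cases h2 : k' = k
    · have h2n : k'.toNat = k.toNat := by omega
      rw [h2n, pvGetD_set_self _ _ _ _ (by omega), if_pos ⟨h1, h2⟩]
    · have h2n : ¬ (k.toNat = k'.toNat) := by omega
      rw [pvGetD_set_ne _ _ _ _ _ h2n, if_neg (by tauto)]
  · have h1n : ¬ (j.toNat = j'.toNat) := by omega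
    rw [pvGetD_set_ne _ _ _ _ _ h1n, if_neg (by tauto)]

lemma pvGet2_init (R C : Nat) (j k : Int) (hj : 0 ≤ j) (hk : 0 ≤ k) :
    pvGet2 (List.replicate R (List.replicate C (0 : Int))) j k = 0 := by
  rw [pvGet2_eq _ _ _ hj hk]
  by_cases h : j.toNat < R
  · rw [show (List.replicate R (List.replicate C (0 : Int))).getD j.toNat [] =
        List.replicate C (0 : Int) from by
      rw [List.getD_eq_getElem?_getD, List.getElem?_replicate, if_pos h]; rfl]
    rw [List.getD_eq_getElem?_getD, List.getElem?_replicate]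
    split <;> rfl
  · rw [show (List.replicate R (List.replicate C (0 : Int))).getD j.toNat [] =
        ([] : List Int) from by
      rw [List.getD_eq_getElem?_getD, List.getElem?_replicate, if_neg h]; rfl]
    rfl

lemma pvShape_init (R C : Nat) :
    pvShape (List.replicate R (List.replicate C (0 : Int))) R C := by
  constructor
  · simp
  · intro row hrow
    simp_all [List.eq_of_mem_replicate hrow]

lemma pvFoldlId {β : Type} (l : List Int) (d : β) : l.foldl (fun d _ => d) d = d := by
  induction l generalizing d with
  | nil => rfl
  | cons a t ih => exact ih d

-- the k-loop of A for one row a (guard value v already known ≤ a)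
lemma pvKFold_char (sumA ln : Int) (R C : Nat) (v a : Int) (hv : 1 ≤ v) (hva : v ≤ a)
    (ha1 : 1 ≤ a) (haA : a ≤ sumA) (hAR : sumA.toNat < R) (hlnC : ln.toNat < C) :
    ∀ (n : Nat) (c : Int), (ln + 1 - c).toNat = n → 1 ≤ c →
    ∀ dp : List (List Int), pvShape dp R C →
      pvShape ((PySem.List.pyRange c (ln + 1) 1).foldl
        (fun dp k => pvSet2 dp a k ((pvGet2 dp a k + pvGet2 dp (a - v) (k - 1)) % 1000000007)) dp) R C ∧
      (∀ j k : Int, 0 ≤ j → j ≤ sumA → 0 ≤ k → k ≤ ln →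
        pvGet2 ((PySem.List.pyRange c (ln + 1) 1).foldl
          (fun dp k => pvSet2 dp a k ((pvGet2 dp a k + pvGet2 dp (a - v) (k - 1)) % 1000000007)) dp) j k =
          if j = a ∧ c ≤ k then (pvGet2 dp a k + pvGet2 dp (a - v) (k - 1)) % 1000000007
          else pvGet2 dp j k) := by
  intro n
  induction n with
  | zero =>
    intro c hfuel hc dp hS
    rw [PySem.List.pyRange_one_eq_nil (by omega)]
    refine ⟨hS, ?_⟩
    intro j k hj hjA hk hkl
    simp only [List.foldl_nil]
    rw [if_neg (by omega)]
  | succ n ih =>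
    intro c hfuel hc dp hS
    rw [PySem.List.pyRange_one_cons (by omega : c < ln + 1)]
    simp only [List.foldl_cons]
    have hS1 : pvShape (pvSet2 dp a c ((pvGet2 dp a c + pvGet2 dp (a - v) (c - 1)) % 1000000007)) R C :=
      pvShape_set2 _ _ _ _ _ _ (by omega) (by omega) hS
    obtain ⟨hSr, hchar⟩ := ih (c + 1) (by omega) (by omega) _ hS1
    refine ⟨hSr, ?_⟩
    intro j k hj hjA hk hkl
    rw [hchar j k hj hjA hk hkl]
    have hget : ∀ z w : Int, 0 ≤ z → 0 ≤ w →
        pvGet2 (pvSet2 dp a c ((pvGet2 dp a c + pvGet2 dp (a - v) (c - 1)) % 1000000007)) z w =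
          if z = a ∧ w = c then (pvGet2 dp a c + pvGet2 dp (a - v) (c - 1)) % 1000000007
          else pvGet2 dp z w := fun z w hz hw =>
      pvGet2_pvSet2 dp R C hS a c _ z w (by omega) (by omega) (by omega) (by omega) hz hw
    by_cases hcase : j = a ∧ c + 1 ≤ k
    · rw [if_pos hcase, if_pos (by omega : j = a ∧ c ≤ k)]
      rw [hget a k (by omega) (by omega), hget (a - v) (k - 1) (by omega) (by omega)]
      rw [if_neg (by omega), if_neg (by omega)]
    · rw [if_neg hcase, hget j k hj hk]
      by_cases h2 : j = a ∧ k = c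
      · rw [if_pos h2, if_pos (show j = a ∧ c ≤ k by omega)]
        obtain ⟨h2a, h2c⟩ := h2
        rw [h2c]
      · rw [if_neg h2, if_neg (by omega)]

-- the j-loop of A for one item value v
lemma pvJFold_char (sumA ln : Int) (R C : Nat) (v : Int) (hv : 1 ≤ v) (_hA : 0 ≤ sumA)
    (hAR : sumA.toNat < R) (hlnC : ln.toNat < C) :
    ∀ (n : Nat) (a : Int), a.toNat = n → a ≤ sumA →
    ∀ dp : List (List Int), pvShape dp R C →
      pvShape ((PySem.List.pyRange a 0 (-1)).foldl (fun dp j =>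
        (PySem.List.pyRange 1 (ln + 1) 1).foldl (fun dp k =>
          if v ≤ j then
            pvSet2 dp j k ((pvGet2 dp j k + pvGet2 dp (j - v) (k - 1)) % 1000000007)
          else dp) dp) dp) R C ∧
      (∀ j k : Int, 0 ≤ j → j ≤ sumA → 0 ≤ k → k ≤ ln →
        pvGet2 ((PySem.List.pyRange a 0 (-1)).foldl (fun dp j =>
          (PySem.List.pyRange 1 (ln + 1) 1).foldl (fun dp k =>
            if v ≤ j then
              pvSet2 dp j k ((pvGet2 dp j k + pvGet2 dp (j - v) (k - 1)) % 1000000007)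
            else dp) dp) dp) j k =
          if 1 ≤ j ∧ j ≤ a ∧ 1 ≤ k ∧ v ≤ j then
            (pvGet2 dp j k + pvGet2 dp (j - v) (k - 1)) % 1000000007
          else pvGet2 dp j k) := by
  intro n
  induction n with
  | zero =>
    intro a hfuel haA dp hS
    rw [PySem.List.pyRange_neg_one_eq_nil (by omega)]
    refine ⟨hS, ?_⟩
    intro j k hj hjA hk hkl
    simp only [List.foldl_nil]
    rw [if_neg (by omega)]
  | succ n ih =>
    intro a hfuel haA dp hS
    have ha1 : 1 ≤ a := by omega
    rw [PySem.List.pyRange_neg_one_cons (by omega : (0 : Int) < a)]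
    simp only [List.foldl_cons]
    by_cases hva : v ≤ a
    · have hrow : (PySem.List.pyRange 1 (ln + 1) 1).foldl (fun dp k =>
          if v ≤ a then
            pvSet2 dp a k ((pvGet2 dp a k + pvGet2 dp (a - v) (k - 1)) % 1000000007)
          else dp) dp
          = (PySem.List.pyRange 1 (ln + 1) 1).foldl (fun dp k =>
          pvSet2 dp a k ((pvGet2 dp a k + pvGet2 dp (a - v) (k - 1)) % 1000000007)) dp :=
        PySem.List.foldl_congr_mem _ _ _ _ (fun acc x _ => by rw [if_pos hva])
    
      rw [hrow]
      obtain ⟨hS1, hchar1⟩ := pvKFold_char sumA ln R C v a hv hva ha1 haA hAR hlnC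
        (ln + 1 - 1).toNat 1 (by omega) (by omega) dp hS
      obtain ⟨hSr, hchar⟩ := ih (a - 1) (by omega) (by omega) _ hS1
      refine ⟨hSr, ?_⟩
      intro j k hj hjA hk hkl
      rw [hchar j k hj hjA hk hkl]
      by_cases hc1 : 1 ≤ j ∧ j ≤ a - 1 ∧ 1 ≤ k ∧ v ≤ j
      · rw [if_pos hc1, if_pos (by omega : 1 ≤ j ∧ j ≤ a ∧ 1 ≤ k ∧ v ≤ j)]
        rw [hchar1 j k hj hjA hk hkl,
          hchar1 (j - v) (k - 1) (by omega) (by omega) (by omega) (by omega)]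
        rw [if_neg (by omega), if_neg (by omega)]
      · rw [if_neg hc1, hchar1 j k hj hjA hk hkl]
        by_cases h2 : j = a ∧ 1 ≤ k
        · obtain ⟨rfl, h2k⟩ := h2
          rw [if_pos ⟨rfl, h2k⟩, if_pos (by omega : 1 ≤ j ∧ j ≤ j ∧ 1 ≤ k ∧ v ≤ j)]
        · rw [if_neg h2, if_neg (by omega)]
    · have hrow : (PySem.List.pyRange 1 (ln + 1) 1).foldl (fun dp k =>
          if v ≤ a then
            pvSet2 dp a k ((pvGet2 dp a k + pvGet2 dp (a - v) (k - 1)) % 1000000007)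
          else dp) dp = dp := by
        rw [PySem.List.foldl_congr_mem _ _ (fun (dp : List (List Int)) (_ : Int) => dp) _
          (fun acc x _ => by rw [if_neg hva])]
        exact pvFoldlId _ _
      rw [hrow]
      obtain ⟨hSr, hchar⟩ := ih (a - 1) (by omega) (by omega) dp hS
      refine ⟨hSr, ?_⟩
      intro j k hj hjA hk hkl
      rw [hchar j k hj hjA hk hkl]
      rw [if_neg (by omega), if_neg (by omega)]

-- folding A's item step over the remaining elements preserves the dp ≡ pvCC invariant
lemma pvItemsFold_char (sumA ln : Int) (R C : Nat) (hA : 0 ≤ sumA)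
    (hAR : sumA.toNat < R) (hlnC : ln.toNat < C) :
    ∀ (t processed : List Int) (dp : List (List Int)), pvShape dp R C →
      (∀ a ∈ processed, 1 ≤ a) → (∀ a ∈ t, 1 ≤ a) →
      (∀ j k : Int, 0 ≤ j → j ≤ sumA → 0 ≤ k → k ≤ ln →
        pvGet2 dp j k = pvCC processed j k % 1000000007) →
      pvShape (t.foldl (pvItemStep sumA ln) dp) R C ∧
      (∀ j k : Int, 0 ≤ j → j ≤ sumA → 0 ≤ k → k ≤ ln →
        pvGet2 (t.foldl (pvItemStep sumA ln) dp) j k =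
          pvCC (processed ++ t) j k % 1000000007) := by
  intro t
  induction t with
  | nil =>
    intro processed dp hS hp ht hinv
    simp only [List.foldl_nil, List.append_nil]
    exact ⟨hS, hinv⟩
  | cons v t' ih =>
    intro processed dp hS hp ht hinv
    simp only [List.foldl_cons]
    have hv : 1 ≤ v := ht v (by simp)
    have ht' : ∀ a ∈ t', 1 ≤ a := fun a ha => ht a (by simp [ha])
    have hp' : ∀ a ∈ processed ++ [v], 1 ≤ a := by
      intro a ha
      rcases List.mem_append.1 ha with h | h
      · exact hp a h
      · simp at h; omega
    obtain ⟨hS1, hchar1⟩ := pvJFold_char sumA ln R C v hv hA hAR hlnC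
      sumA.toNat sumA rfl le_rfl dp hS
    have hinv1 : ∀ j k : Int, 0 ≤ j → j ≤ sumA → 0 ≤ k → k ≤ ln →
        pvGet2 (pvItemStep sumA ln dp v) j k = pvCC (processed ++ [v]) j k % 1000000007 := by
      intro j k hj hjA hk hkl
      unfold pvItemStep
      rw [hchar1 j k hj hjA hk hkl, pvCC_snoc]
      by_cases hcond : 1 ≤ j ∧ j ≤ sumA ∧ 1 ≤ k ∧ v ≤ j
      · rw [if_pos hcond, hinv j k hj hjA hk hkl,
          hinv (j - v) (k - 1) (by omega) (by omega) (by omega) (by omega), ← Int.add_emod]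
      · rw [if_neg hcond, hinv j k hj hjA hk hkl]
        have hzero : pvCC processed (j - v) (k - 1) = 0 := by
          by_cases hk1 : k < 1
          · exact pvCC_k_neg _ _ _ (by omega)
          · exact pvCC_j_neg _ _ _ hp (by omega)
        rw [hzero, add_zero]
    have hS1' : pvShape (pvItemStep sumA ln dp v) R C := by unfold pvItemStep; exact hS1
    obtain ⟨hSr, hcharr⟩ := ih (processed ++ [v]) (pvItemStep sumA ln dp v) hS1' hp' ht' hinv1
    refine ⟨hSr, ?_⟩
    intro j k hj hjA hk hkl
    rw [hcharr j k hj hjA hk hkl]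
    have : (processed ++ [v]) ++ t' = processed ++ v :: t' := by simp
    rw [this]

lemma pvFoldlAddCongr (f : Int → Int) : ∀ (t : List Int) (c c' : Int),
    c % 1000000007 = c' % 1000000007 →
    (t.foldl (fun a i => a + f i) c) % 1000000007 =
      (t.foldl (fun a i => a + f i) c') % 1000000007 := by
  intro t
  induction t with
  | nil => intro c c' h; simpa using h
  | cons i t ih =>
    intro c c' h
    simp only [List.foldl_cons]
    exact ih _ _ (by rw [Int.add_emod c, Int.add_emod c', h])

lemma pvFoldlMod (f : Int → Int) : ∀ (l : List Int) (c : Int), c % 1000000007 = c →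
    l.foldl (fun a i => (a + f i) % 1000000007) c =
      (l.foldl (fun a i => a + f i) c) % 1000000007 := by
  intro l
  induction l with
  | nil => intro c hc; simpa using hc.symm
  | cons i t ih =>
    intro c hc
    simp only [List.foldl_cons]
    rw [ih _ (Int.emod_emod_of_dvd _ dvd_rfl)]
    exact pvFoldlAddCongr f t _ _ (Int.emod_emod_of_dvd _ dvd_rfl)

-- ===== VERDICT (by name: the statement is the Claim_ definition above) =====
theorem twoSubsequences_spec : Claim_equal_twoSubsequences := by
  intro x r s _ hpre
  unfold Spec_twoSubsequences
  by_cases hg : r < s ∨ PySem.Int.mod (r + s) 2 ≠ 0 ∨ (r = 0 ∧ s = 0)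
  · simp only [twoSubsequences, twoSubsequences_alt, if_pos hg]
  · obtain ⟨hne, hpos, hs0⟩ : x ≠ [] ∧ (∀ a ∈ x, 1 ≤ a) ∧ 0 ≤ s := by
      rcases hpre with h | h
      · exact absurd h hg
      · exact h
    have hrs : ¬ r < s := fun h => hg (Or.inl h)
    have hmod : PySem.Int.mod (r + s) 2 = 0 := by
      by_contra h; exact hg (Or.inr (Or.inl h))
    have hmod2 : (r + s) % 2 = 0 := by
      rw [← PySem.Int.mod_eq_emod_of_pos (by norm_num : (0 : Int) < 2)]; exact hmod
    simp only [twoSubsequences, twoSubsequences_alt, if_neg hg]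
    set sA := PySem.Int.floordiv (r + s) 2 with hsA
    set sB := PySem.Int.floordiv (r - s) 2 with hsB
    have hsA' : sA = (r + s) / 2 := PySem.Int.floordiv_eq_ediv_of_pos (by norm_num)
    have hsB' : sB = (r - s) / 2 := PySem.Int.floordiv_eq_ediv_of_pos (by norm_num)
    have hA0 : 0 ≤ sA := by omega
    have hB0 : 0 ≤ sB := by omega
    have hBA : sB ≤ sA := by omega
    have hAr : sA ≤ r := by omega
    obtain ⟨x0, rest, rfl⟩ : ∃ x0 rest, x = x0 :: rest := by
      cases x with
      | nil => exact absurd rfl hne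
      | cons a t => exact ⟨a, t, rfl⟩
    have hx0pos : 1 ≤ x0 := hpos x0 (by simp)
    have hlen1 : 1 ≤ (x0 :: rest).length := by simp
    set ln : Int := ((x0 :: rest).length : Int) with hln
    have hln1 : 1 ≤ ln := by simp [hln]
    set R : Nat := (r + 1).toNat with hR
    set C : Nat := (ln + 1).toNat with hC
    have hAR : sA.toNat < R := by omega
    have hlnC : ln.toNat < C := by omega
    -- initial table
    set dp0 : List (List Int) := List.replicate R (List.replicate C 0) with hdp0
    have hS0 : pvShape dp0 R C := pvShape_init R C
    set dp1 := pvSet2 dp0 0 0 1 with hdp1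
    have hS1 : pvShape dp1 R C := pvShape_set2 _ _ _ _ _ _ le_rfl le_rfl hS0
    have hchar1 : ∀ j k : Int, 0 ≤ j → 0 ≤ k →
        pvGet2 dp1 j k = if j = 0 ∧ k = 0 then 1 else 0 := by
      intro j k hj hk
      rw [hdp1, pvGet2_pvSet2 dp0 R C hS0 0 0 1 j k le_rfl le_rfl (by omega) (by omega) hj hk]
      split
      · rfl
      · exact pvGet2_init R C j k hj hk
    rw [PySem.List.pyGetD_zero_cons]
    set dp2 := if x0 ≤ sA then pvSet2 dp1 x0 1 1 else dp1 with hdp2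
    have hS2 : pvShape dp2 R C := by
      rw [hdp2]; split
      · exact pvShape_set2 _ _ _ _ _ _ (by omega) (by omega) hS1
      · exact hS1
    have hchar2 : ∀ j k : Int, 0 ≤ j → j ≤ sA → 0 ≤ k → k ≤ ln →
        pvGet2 dp2 j k = pvCC [x0] j k % 1000000007 := by
      intro j k hj hjA hk hkl
      have hcc : pvCC [x0] j k =
          (if j = 0 ∧ k = 0 then 1 else 0) + (if j - x0 = 0 ∧ k - 1 = 0 then 1 else 0) := by
        simp only [pvCC]
      rw [hcc, hdp2]
      by_cases hx0 : x0 ≤ sA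
      · rw [if_pos hx0,
          pvGet2_pvSet2 dp1 R C hS1 x0 1 1 j k (by omega) (by omega) (by omega) (by omega) hj hk,
          hchar1 j k hj hk]
        split_ifs <;> omega
      · rw [if_neg hx0, hchar1 j k hj hk]
        split_ifs <;> omega
    -- the item loop
    rw [hln]
    rw [PySem.List.foldl_pyRange_pyGetD' (x0 :: rest) 0
      (pvItemStep sA (((x0 :: rest).length : Nat) : Int)) dp2 (by omega)]
    rw [← hln]
    simp only [Int.toNat_one, List.drop_succ_cons, List.drop_zero]
    obtain ⟨hS3, hchar3⟩ := pvItemsFold_char sA ln R C hA0 hAR hlnC rest [x0] dp2 hS2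
      (fun a ha => by simp at ha; omega)
      (fun a ha => hpos a (by simp [ha]))
      hchar2
    have hchar3' : ∀ j k : Int, 0 ≤ j → j ≤ sA → 0 ≤ k → k ≤ ln →
        pvGet2 (rest.foldl (pvItemStep sA ln) dp2) j k = pvCC (x0 :: rest) j k % 1000000007 := by
      intro j k hj hjA hk hkl
      rw [hchar3 j k hj hjA hk hkl]
      norm_num
    -- final correlation fold
    rw [pvFoldlMod (fun i => pvGet2 (rest.foldl (pvItemStep sA ln) dp2) sA i *
        pvGet2 (rest.foldl (pvItemStep sA ln) dp2) sB i) _ 0 (by decide)]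
    rw [PySem.List.foldl_congr_mem (PySem.List.pyRange 1 (ln + 1) 1)
      (fun (ans : Int) (i : Int) => ans + pvGet2 (rest.foldl (pvItemStep sA ln) dp2) sA i *
        pvGet2 (rest.foldl (pvItemStep sA ln) dp2) sB i)
      (fun (ans : Int) (i : Int) => ans + pvCnt (x0 :: rest) sA i * pvCnt (x0 :: rest) sB i)
      0 ?_]
    intro acc i hi
    have hi' : 1 ≤ i ∧ i < ln + 1 := (PySem.List.mem_pyRange_one).1 hi
    beta_reduce
    rw [hchar3' sA i hA0 le_rfl (by omega) (by omega),
      hchar3' sB i hB0 hBA (by omega) (by omega),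
      pvCnt_eq (x0 :: rest) sA i hpos hA0 (by omega),
      pvCnt_eq (x0 :: rest) sB i hpos hB0 (by omega)]
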